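-- pv_equiv track=rewrite | github.com/nixonsparrow/adventofcode2021 | puzzles/day07.py | compare_with_next
-- ===== SOURCE A (Python) =====
-- def sum_total_fuel_needed(positions, target, that_simple=True):
--     if not that_simple:
--         fuel = 0
--         for pos in positions:
--             i = 1
--             for r in range(abs(pos - target)):
--                 fuel += i
--                 i += 1
--         return fuel
--     return sum([abs(pos - target) for pos in positions])
--
-- def compare_with_next(positions, least_fuel, simple, descending=False):
--     avg = len(positions)//2
--     # loop check if +1/-1 position is better until it's not
--     while avg >= min(positions) if descending else avg <= max(positions):
--         if sum_total_fuel_needed(positions, avg - 1 if descending else avg + 1, simple) <= least_fuel: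
--             avg += - 1 if descending else 1
--             least_fuel = sum_total_fuel_needed(positions, avg, simple)
--         else:
--             return least_fuel
--     return least_fuel
-- ===== SOURCE B (Python) =====
-- def _total_fuel(positions, target, simple):
--     # closed form: sum of 1..d is d*(d+1)//2 (no inner loop)
--     if simple:
--         return sum(abs(p - target) for p in positions)
--     total = 0
--     for p in positions:
--         d = abs(p - target)
--         total += d * (d + 1) // 2
--     return total
--
-- def compare_with_next(positions, least_fuel, simple, descending=False):
--     lo, hi = min(positions), max(positions)
--     avg = len(positions) // 2
--     while (avg >= lo) if descending else (avg <= hi):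
--         nxt = avg - 1 if descending else avg + 1
--         c = _total_fuel(positions, nxt, simple)
--         if c > least_fuel:
--             break
--         avg, least_fuel = nxt, c
--     return least_fuel
-- ===== Notes on version B (the rewrite author's own statement) =====
-- stated objective: alternative
-- what changed: B computes each candidate's fuel with the closed form d*(d+1)//2 instead of A's inner triangular loop (fuel += i; i += 1 repeated |pos-target| times), and reuses the just-computed cost instead of recomputing it after each step of the walk.
-- outside the precondition, e.g. on compare_with_next([], 5, True, False): A raises ValueError, B raises ValueError
import Mathlib
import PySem

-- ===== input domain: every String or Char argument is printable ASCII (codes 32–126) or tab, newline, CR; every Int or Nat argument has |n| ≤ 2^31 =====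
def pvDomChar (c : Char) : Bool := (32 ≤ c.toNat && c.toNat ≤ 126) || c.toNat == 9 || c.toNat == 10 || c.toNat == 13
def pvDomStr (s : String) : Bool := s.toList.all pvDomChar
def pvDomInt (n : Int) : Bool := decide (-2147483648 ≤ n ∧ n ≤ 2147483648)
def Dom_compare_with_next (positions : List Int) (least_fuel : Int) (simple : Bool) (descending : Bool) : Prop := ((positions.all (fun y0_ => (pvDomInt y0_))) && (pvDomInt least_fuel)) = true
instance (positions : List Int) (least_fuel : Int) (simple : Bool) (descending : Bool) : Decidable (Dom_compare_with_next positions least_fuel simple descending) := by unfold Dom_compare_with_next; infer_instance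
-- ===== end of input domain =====

-- B replaces A's triangular inner loop (fuel += i; i += 1, |pos-target| times) by the
-- closed form d*(d+1)//2 and reuses the just-computed cost instead of recomputing it.

-- ===== PORT A =====
def sum_total_fuel_needed (positions : List Int) (target : Int) (that_simple : Bool) : Int :=
  if !that_simple then
    positions.foldl (fun fuel pos =>
      ((PySem.List.pyRange 0 |pos - target| 1).foldl
        (fun (st : Int × Int) _ => (st.1 + st.2, st.2 + 1)) (fuel, 1)).1) 0
  else
    (positions.map (fun pos => |pos - target|)).sum

def cwnLoopA (positions : List Int) (simple descending : Bool) (m M avg least_fuel : Int) : Int :=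
  if (if descending then avg ≥ m else avg ≤ M) then
    if sum_total_fuel_needed positions (if descending then avg - 1 else avg + 1) simple ≤ least_fuel then
      let avg' := avg + (if descending then -1 else 1)
      cwnLoopA positions simple descending m M avg' (sum_total_fuel_needed positions avg' simple)
    else least_fuel
  else least_fuel
termination_by (if descending then avg - m + 1 else M - avg + 1).toNat
decreasing_by cases descending <;> simp_all

def compare_with_next (positions : List Int) (least_fuel : Int) (simple : Bool) (descending : Bool) : Int :=
  let avg := PySem.Int.floordiv (PySem.List.len positions) 2
  cwnLoopA positions simple descending
    ((PySem.List.min? positions (fun x => x)).getD 0)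
    ((PySem.List.max? positions (fun x => x)).getD 0) avg least_fuel

-- ===== PORT B =====
def totalFuelAlt (positions : List Int) (target : Int) (simple : Bool) : Int :=
  if simple then (positions.map (fun p => |p - target|)).sum
  else positions.foldl (fun total p =>
    let d := |p - target|
    total + PySem.Int.floordiv (d * (d + 1)) 2) 0

def cwnLoopB (positions : List Int) (simple descending : Bool) (lo hi avg least_fuel : Int) : Int :=
  if (if descending then avg ≥ lo else avg ≤ hi) then
    let nxt := if descending then avg - 1 else avg + 1
    let c := totalFuelAlt positions nxt simple
    if c > least_fuel then least_fuel
    else cwnLoopB positions simple descending lo hi nxt c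
  else least_fuel
termination_by (if descending then avg - lo + 1 else hi - avg + 1).toNat
decreasing_by cases descending <;> simp_all

def compare_with_next_alt (positions : List Int) (least_fuel : Int) (simple : Bool) (descending : Bool) : Int :=
  let lo := (PySem.List.min? positions (fun x => x)).getD 0
  let hi := (PySem.List.max? positions (fun x => x)).getD 0
  let avg := PySem.Int.floordiv (PySem.List.len positions) 2
  cwnLoopB positions simple descending lo hi avg least_fuel

-- ===== PRECONDITION & SPEC =====
-- Pre_ excludes only the empty list, on which Python A raises ValueError (min/max of empty sequence); B raises there too.
def Pre_compare_with_next (positions : List Int) (least_fuel : Int) (simple : Bool) (descending : Bool) : Prop := positions ≠ []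
instance (positions : List Int) (least_fuel : Int) (simple : Bool) (descending : Bool) : Decidable (Pre_compare_with_next positions least_fuel simple descending) := by unfold Pre_compare_with_next; infer_instance

def pvWitness_compare_with_next : List Int × Int × Bool × Bool := ([0, 1, 2], 10, true, false)

def Spec_compare_with_next (positions : List Int) (least_fuel : Int) (simple : Bool) (descending : Bool) (out : Int) : Prop := out = compare_with_next_alt positions least_fuel simple descending
instance (positions : List Int) (least_fuel : Int) (simple : Bool) (descending : Bool) (out : Int) : Decidable (Spec_compare_with_next positions least_fuel simple descending out) := by unfold Spec_compare_with_next; infer_instance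

-- ===== CLAIM (what is proved, stated in full; the proofs are below) =====
def Claim_equal_compare_with_next : Prop := ∀ (positions : List Int) (least_fuel : Int) (simple : Bool) (descending : Bool), Dom_compare_with_next positions least_fuel simple descending → Pre_compare_with_next positions least_fuel simple descending → Spec_compare_with_next positions least_fuel simple descending (compare_with_next positions least_fuel simple descending)

-- ===== LEMMAS AND PROOFS =====

-- A's triangular inner loop over range(k), started at counter i, in closed form
theorem triFold (k : Nat) (f i : Int) :
    (List.range k).foldl (fun (st : Int × Int) _ => (st.1 + st.2, st.2 + 1)) (f, i)
      = (f + k * i + ((k:Int) * ((k:Int) - 1)) / 2, i + k) := by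
  induction k generalizing f i with
  | zero => norm_num
  | succ k ih =>
    rw [List.range_succ, List.foldl_append, ih]
    simp only [List.foldl_cons, List.foldl_nil]
    obtain ⟨t, ht⟩ := Int.even_mul_succ_self ((k : Int) - 1)
    have e1 : ((k:Int) * ((k:Int) - 1)) / 2 = t := by
      have h1 : (k:Int)*((k:Int)-1) = 2*t := by linear_combination ht
      rw [h1]; exact Int.mul_ediv_cancel_left t (by norm_num)
    rw [Prod.mk.injEq]
    constructor
    · push_cast
      have e2 : ((↑k + 1) * (↑k + 1 - 1) : Int) / 2 = t + k := by
        have h2 : ((↑k + 1) * (↑k + 1 - 1) : Int) = 2*(t + k) := by linear_combination ht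
        rw [h2]; exact Int.mul_ediv_cancel_left _ (by norm_num)
      rw [e1, e2]; ring
    · push_cast; ring

-- A's fuel helper equals B's closed-form fuel helper
theorem fuel_eq (positions : List Int) (target : Int) (simple : Bool) :
    sum_total_fuel_needed positions target simple = totalFuelAlt positions target simple := by
  cases simple with
  | true => simp [sum_total_fuel_needed, totalFuelAlt]
  | false =>
    simp only [sum_total_fuel_needed, totalFuelAlt, Bool.not_false, if_true,
      Bool.false_eq_true, if_false]
    congr 1
    funext fuel pos
    rw [PySem.List.pyRange_one, List.foldl_map, triFold]
    have hd : (0 : Int) ≤ |pos - target| := abs_nonneg _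
    have hk : (((|pos - target| - 0).toNat : Int)) = |pos - target| := by omega
    rw [hk]
    rw [PySem.Int.floordiv_eq_ediv_of_pos (by norm_num)]
    obtain ⟨t, ht⟩ := Int.even_mul_succ_self |pos - target|
    have e1 : (|pos - target| * (|pos - target| - 1)) / 2 = t - |pos - target| := by
      have h1 : |pos - target| * (|pos - target| - 1) = 2*(t - |pos - target|) := by linear_combination ht
      rw [h1]; exact Int.mul_ediv_cancel_left _ (by norm_num)
    have e2 : (|pos - target| * (|pos - target| + 1)) / 2 = t := by
      have h2 : |pos - target| * (|pos - target| + 1) = 2*t := by linear_combination ht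
      rw [h2]; exact Int.mul_ediv_cancel_left _ (by norm_num)
    simp only [e1, e2]
    ring

-- the two walking loops agree step for step
theorem loop_eq (positions : List Int) (simple descending : Bool) (m M : Int) :
    ∀ avg least_fuel, cwnLoopA positions simple descending m M avg least_fuel
      = cwnLoopB positions simple descending m M avg least_fuel := by
  intro avg least_fuel
  fun_induction cwnLoopA positions simple descending m M avg least_fuel with
  | case1 avg lf hcond hle avg' ih =>
    have hc : (if descending = true then avg ≥ m else avg ≤ M) := hcond
    have hnxt : (if descending = true then avg - 1 else avg + 1) = avg' := by
      simp only [avg']; cases descending <;> norm_num <;> omega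
    have hle2 : sum_total_fuel_needed positions (if descending = true then avg - 1 else avg + 1) simple ≤ lf := hle
    rw [hnxt] at hle2
    rw [cwnLoopB, if_pos hc]
    simp only [hnxt, ← fuel_eq]
    rw [if_neg (by omega)]
    exact ih
  | case2 avg lf hcond hgt =>
    have hc : (if descending = true then avg ≥ m else avg ≤ M) := hcond
    have hgt2 : ¬ sum_total_fuel_needed positions (if descending = true then avg - 1 else avg + 1) simple ≤ lf := hgt
    rw [cwnLoopB, if_pos hc]
    simp only [← fuel_eq]
    rw [if_pos (by omega)]
  | case3 avg lf hcond =>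
    have hc : ¬ (if descending = true then avg ≥ m else avg ≤ M) := hcond
    rw [cwnLoopB, if_neg hc]

-- ===== VERDICT (by name: the statement is the Claim_ definition above) =====
theorem compare_with_next_spec : Claim_equal_compare_with_next := by
  intro positions least_fuel simple descending _ _
  unfold Spec_compare_with_next compare_with_next compare_with_next_alt
  exact loop_eq _ _ _ _ _ _ _
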